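-- pv_equiv track=rewrite | github.com/Kuldr/Advent-of-Code | 2015/03/solution.py | deliverPresents
-- ===== SOURCE A (Python) =====
-- def deliverPresents(inputStr, houses):
-- 	x = 0
-- 	y = 0
--
-- 	houses[(x, y)] += 1
--
-- 	for char in inputStr:
-- 		if char == "^":
-- 			y += 1
-- 		elif char == "v":
-- 			y -= 1
-- 		elif char == ">":
-- 			x += 1
-- 		elif char == "<":
-- 			x -= 1
--
-- 		houses[(x, y)] += 1
--
-- 	return houses
-- ===== SOURCE B (Python) =====
-- def deliverPresents(inputStr, houses):
--     # pass 1: compute the trajectory with independent x/y prefix sums (no branch chain)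
--     path = [(0, 0)]
--     x = y = 0
--     for ch in inputStr:
--         x += (ch == ">") - (ch == "<")
--         y += (ch == "^") - (ch == "v")
--         path.append((x, y))
--     # pass 2: aggregate visit counts per position
--     counts = {}
--     for pos in path:
--         counts[pos] = counts.get(pos, 0) + 1
--     # pass 3: one aggregated update per distinct visited position (in-place)
--     for pos, c in counts.items():
--         houses[pos] += c
--     return houses
-- ===== Notes on version B (the rewrite author's own statement) =====
-- stated objective: alternative
-- what changed: A fuses the walk with per-step dict increments; B is three staged passes: build the trajectory by boolean-arithmetic prefix sums, aggregate visit multiplicities into a counter, then apply one aggregated update per distinct visited position. Pre_ excludes inputs where some visited position is missing from houses (both raise KeyError there) and list encodings with duplicate keys, which represent no Python dict.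
import Mathlib
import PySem

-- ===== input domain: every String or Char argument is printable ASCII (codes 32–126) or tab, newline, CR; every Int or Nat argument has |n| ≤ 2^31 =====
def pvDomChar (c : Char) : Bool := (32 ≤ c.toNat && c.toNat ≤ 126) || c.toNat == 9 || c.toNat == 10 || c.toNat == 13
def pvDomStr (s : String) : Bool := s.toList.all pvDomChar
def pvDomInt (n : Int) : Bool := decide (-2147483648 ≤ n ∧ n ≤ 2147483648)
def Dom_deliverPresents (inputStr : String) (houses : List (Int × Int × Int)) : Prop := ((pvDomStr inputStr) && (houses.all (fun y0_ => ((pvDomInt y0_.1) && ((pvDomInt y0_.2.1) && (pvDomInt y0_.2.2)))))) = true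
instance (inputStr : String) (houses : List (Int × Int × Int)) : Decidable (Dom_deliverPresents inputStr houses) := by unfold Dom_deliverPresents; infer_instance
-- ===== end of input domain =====

-- B restructures A's fused walk-and-increment loop into three passes (trajectory by
-- prefix sums, a visit counter, one aggregated update per distinct visited position);
-- in Python both mutate and return the same dict — the theorem is about the returned value.


-- ===== PORT A =====
-- houses is the dict {(x,y): count} as (x, y, count) triples in insertion order;
-- `bump` is `houses[(x,y)] += 1` on the first matching key (a Python dict has unique
-- keys); on a missing key Python raises KeyError — such inputs are excluded by
-- Pre_ below (here bump leaves the list unchanged there).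
def bump (x y : Int) : List (Int × Int × Int) → List (Int × Int × Int)
  | [] => []
  | (hx, hy, c) :: rest =>
    if hx = x ∧ hy = y then (hx, hy, c + 1) :: rest
    else (hx, hy, c) :: bump x y rest

-- A's single loop: update (x,y) by the if/elif chain, then bump, char by char.
def goA : List Char → Int → Int → List (Int × Int × Int) → List (Int × Int × Int)
  | [], _, _, h => h
  | c :: cs, x, y, h =>
    if c = '^' then goA cs x (y + 1) (bump x (y + 1) h)
    else if c = 'v' then goA cs x (y - 1) (bump x (y - 1) h)
    else if c = '>' then goA cs (x + 1) y (bump (x + 1) y h)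
    else if c = '<' then goA cs (x - 1) y (bump (x - 1) y h)
    else goA cs x y (bump x y h)

def deliverPresents (inputStr : String) (houses : List (Int × Int × Int)) : List (Int × Int × Int) :=
  goA inputStr.toList 0 0 (bump 0 0 houses)

-- ===== PORT B =====
-- Source B pass 1: x += (ch == ">") - (ch == "<") etc. (bools as 0/1 ints, exact).
def stepXY (x y : Int) (c : Char) : Int × Int :=
  (x + (if c = '>' then 1 else 0) - (if c = '<' then 1 else 0),
   y + (if c = '^' then 1 else 0) - (if c = 'v' then 1 else 0))

def buildPath : Int → Int → List Char → List (Int × Int)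
  | _, _, [] => []
  | x, y, c :: cs => (stepXY x y c) :: buildPath (stepXY x y c).1 (stepXY x y c).2 cs

-- Source B pass 3 body: houses[pos] += n on the first matching key; on a missing key
-- Python raises KeyError — excluded by Pre_ below (here a no-op).
def addAt (k : Int × Int) (n : Int) : List (Int × Int × Int) → List (Int × Int × Int)
  | [] => []
  | e :: rest =>
    if (e.1, e.2.1) = k then (e.1, e.2.1, e.2.2 + n) :: rest
    else e :: addAt k n rest

def deliverPresents_alt (inputStr : String) (houses : List (Int × Int × Int)) : List (Int × Int × Int) :=
  let path := (0, 0) :: buildPath 0 0 inputStr.toList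
  -- pass 2: counts[pos] = counts.get(pos, 0) + 1
  let counts := path.foldl (fun d p => d.insert p (d.getD p 0 + 1)) (PySem.Dict.empty : PySem.Dict (Int × Int) Int)
  -- pass 3: for pos, c in counts.items(): houses[pos] += c
  counts.items.foldl (fun h kc => addAt kc.1 kc.2 h) houses

-- ===== PRECONDITION & SPEC =====
-- the walker's position after the first k moves, in closed form (prefix counts)
def posAt (cs : List Char) (k : Nat) : Int × Int :=
  (((cs.take k).count '>' : Int) - ((cs.take k).count '<' : Int),
   ((cs.take k).count '^' : Int) - ((cs.take k).count 'v' : Int))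

-- Pre_ excludes (a) the inputs on which Python A raises KeyError — some visited
-- position is not a key of houses — and (b) list encodings with duplicate keys,
-- which represent no Python dict (every Python input is a dict, so this excludes
-- no Python-reachable input).
def Pre_deliverPresents (inputStr : String) (houses : List (Int × Int × Int)) : Prop :=
  (houses.map (fun e => (e.1, e.2.1))).Nodup ∧
  ∀ k ∈ List.range (inputStr.toList.length + 1),
    posAt inputStr.toList k ∈ houses.map (fun e => (e.1, e.2.1))
instance (inputStr : String) (houses : List (Int × Int × Int)) : Decidable (Pre_deliverPresents inputStr houses) := by unfold Pre_deliverPresents; infer_instance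

def pvWitness_deliverPresents : String × (List (Int × Int × Int)) :=
  ("^>", [(0, 0, 1), (0, 1, 2), (1, 1, 3)])

def Spec_deliverPresents (inputStr : String) (houses : List (Int × Int × Int)) (out : List (Int × Int × Int)) : Prop := out = deliverPresents_alt inputStr houses
instance (inputStr : String) (houses : List (Int × Int × Int)) (out : List (Int × Int × Int)) : Decidable (Spec_deliverPresents inputStr houses out) := by unfold Spec_deliverPresents; infer_instance

-- ===== CLAIM (what is proved, stated in full; the proofs are below) =====
def Claim_equal_deliverPresents : Prop := ∀ (inputStr : String) (houses : List (Int × Int × Int)), Dom_deliverPresents inputStr houses → Pre_deliverPresents inputStr houses → Spec_deliverPresents inputStr houses (deliverPresents inputStr houses)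

-- ===== LEMMAS AND PROOFS =====
-- keys of the association list
def keysOf (h : List (Int × Int × Int)) : List (Int × Int) := h.map (fun e => (e.1, e.2.1))

lemma bump_eq_addAt (x y : Int) (h : List (Int × Int × Int)) :
    bump x y h = addAt (x, y) 1 h := by
  induction h with
  | nil => rfl
  | cons e rest ih =>
    obtain ⟨hx, hy, c⟩ := e
    simp only [bump, addAt, Prod.mk.injEq, ih]

-- A's fused loop equals folding single bumps along B's trajectory.
lemma goA_eq_foldl (cs : List Char) :
    ∀ (x y : Int) (h : List (Int × Int × Int)),
      goA cs x y h = (buildPath x y cs).foldl (fun h p => addAt p 1 h) h := by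
  induction cs with
  | nil => intro x y h; simp [goA, buildPath]
  | cons c cs ih =>
    intro x y h
    simp only [goA, buildPath, List.foldl_cons, bump_eq_addAt]
    split_ifs <;> simp_all [stepXY, sub_eq_add_neg]

lemma keys_addAt (k : Int × Int) (n : Int) (h : List (Int × Int × Int)) :
    keysOf (addAt k n h) = keysOf h := by
  induction h with
  | nil => rfl
  | cons e rest ih =>
    simp only [addAt]
    split_ifs with hk
    · simp [keysOf]
    · simp only [keysOf, List.map_cons] at ih ⊢
      rw [ih]

-- pushing one addAt inside the "add g of your key to every entry" map
lemma map_addAt (p : Int × Int) (n : Int) (g : Int × Int → Int)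
    (h : List (Int × Int × Int)) (hnd : (keysOf h).Nodup) :
    (addAt p n h).map (fun e => (e.1, e.2.1, e.2.2 + g (e.1, e.2.1))) =
      h.map (fun e => (e.1, e.2.1, e.2.2 + (g (e.1, e.2.1) + if (e.1, e.2.1) = p then n else 0))) := by
  induction h with
  | nil => rfl
  | cons e rest ih =>
    simp only [keysOf, List.map_cons, List.nodup_cons] at hnd
    obtain ⟨hnotin, hnd'⟩ := hnd
    simp only [addAt]
    split_ifs with hk
    · subst hk
      simp only [List.map_cons, List.cons.injEq]
      refine ⟨by simp [Prod.ext_iff]; ring, ?_⟩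
      apply List.map_congr_left
      intro a ha
      have hne : (a.1, a.2.1) ≠ (e.1, e.2.1) := fun hEq => hnotin (hEq ▸ List.mem_map_of_mem ha)
      simp [hne]
    · simp only [List.map_cons, if_neg hk, add_zero, List.cons.injEq]
      exact ⟨by simp, ih hnd'⟩

-- fold of unit bumps = add the multiset count of your key to every entry
lemma foldl_addAt_one (ps : List (Int × Int)) :
    ∀ (h : List (Int × Int × Int)), (keysOf h).Nodup →
      ps.foldl (fun h p => addAt p 1 h) h =
        h.map (fun e => (e.1, e.2.1, e.2.2 + (ps.count (e.1, e.2.1) : Int))) := by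
  induction ps with
  | nil =>
    intro h _
    simp
  | cons p ps ih =>
    intro h hnd
    have hnd' : (keysOf (addAt p 1 h)).Nodup := by rw [keys_addAt]; exact hnd
    simp only [List.foldl_cons]
    rw [ih (addAt p 1 h) hnd',
        map_addAt p 1 (fun q => (ps.count q : Int)) h hnd]
    apply List.map_congr_left
    intro a _
    by_cases hc : (a.1, a.2.1) = p
    · simp [hc]
    · simp [hc, Ne.symm hc]

-- fold of aggregated updates over a nodup key list
lemma foldl_addAt_m (m : Int × Int → Int) (ks : List (Int × Int)) :
    ∀ (h : List (Int × Int × Int)), (keysOf h).Nodup → ks.Nodup →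
      ks.foldl (fun h k => addAt k (m k) h) h =
        h.map (fun e => (e.1, e.2.1, e.2.2 + (if (e.1, e.2.1) ∈ ks then m (e.1, e.2.1) else 0))) := by
  induction ks with
  | nil =>
    intro h _ _
    simp
  | cons k ks ih =>
    intro h hnd hks
    simp only [List.nodup_cons] at hks
    obtain ⟨hkni, hks'⟩ := hks
    have hnd' : (keysOf (addAt k (m k) h)).Nodup := by rw [keys_addAt]; exact hnd
    simp only [List.foldl_cons]
    rw [ih (addAt k (m k) h) hnd' hks',
        map_addAt k (m k) (fun q => if q ∈ ks then m q else 0) h hnd]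
    apply List.map_congr_left
    intro a _
    by_cases hak : (a.1, a.2.1) = k
    · simp [hak, hkni]
    · simp [hak, List.mem_cons]

-- ===== VERDICT (by name: the statement is the Claim_ definition above) =====
theorem deliverPresents_spec : Claim_equal_deliverPresents := by
  intro inputStr houses _ hpre
  obtain ⟨hnd, _⟩ := hpre
  show deliverPresents inputStr houses = deliverPresents_alt inputStr houses
  have hnd' : (keysOf houses).Nodup := hnd
  unfold deliverPresents deliverPresents_alt
  rw [goA_eq_foldl, bump_eq_addAt]
  have hA : (buildPath 0 0 inputStr.toList).foldl (fun h p => addAt p 1 h) (addAt (0, 0) 1 houses) =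
      ((0, 0) :: buildPath 0 0 inputStr.toList).foldl (fun h p => addAt p 1 h) houses := rfl
  rw [hA, foldl_addAt_one _ houses hnd']
  -- pass 2 builds Counter(path); its items are (k, path.count k) over the deduped path
  simp only [PySem.Dict.foldl_insert_getD_add_one_eq_counter, PySem.Dict.items_counter,
    List.foldl_map]
  rw [foldl_addAt_m (fun k => (((0, 0) :: buildPath 0 0 inputStr.toList).count k : Int))
        (PySem.Set.ofList ((0, 0) :: buildPath 0 0 inputStr.toList)) houses hnd'
        (PySem.Set.nodup_ofList _)]
  apply List.map_congr_left
  intro a _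
  by_cases hmem : (a.1, a.2.1) ∈ (0, 0) :: buildPath 0 0 inputStr.toList
  · simp [PySem.Set.mem_ofList, hmem]
  · simp [PySem.Set.mem_ofList, hmem, List.count_eq_zero.mpr hmem]
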